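-- pv_equiv track=rewrite | github.com/Alvaropz/Python_problems_BinarySearch | 2. Medium/selling_products/selling_products.py | selling_products
-- ===== SOURCE A (Python) =====
-- from collections import Counter
--
-- def selling_products(items, n):
--     d = Counter(items)
--     list_values = sorted(d.values())
--     if n == 0:
--         return len(list_values)
--     elif not items or sum(list_values) == n:
--         return 0
--     if len(list_values) == 1:
--         return 1
--     c_value = list_values[0]
--     while n > 0:
--         if n - c_value >= 0:
--             n -= c_value
--             list_values.pop(0)
--             c_value = list_values[0]
--         else:
--             n = 0
--     return len(list_values)
-- ===== SOURCE B (Python) =====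
-- from collections import Counter
-- from bisect import bisect_right
-- from itertools import accumulate
--
--
-- def selling_products(items, n):
--     counts = sorted(Counter(items).values())
--     prefix = list(accumulate(counts))
--     sold = bisect_right(prefix, n)
--     return len(counts) - sold
-- ===== Notes on version B (the rewrite author's own statement) =====
-- stated objective: faster
-- what changed: Replaces the quadratic pop(0)-while-loop over sorted group counts by prefix sums plus one bisect_right to find the removable prefix in one step.
-- intended difference: On inventories with exactly one distinct value and budget n greater than the total stock, A's single-group shortcut returns 1 while B returns 0; everything can be bought, so 0 is the intended count of remaining groups. — e.g. on selling_products([5, 5], 3): A returns 1, B returns 0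
-- crash fix: When there are at least two distinct values and n exceeds the total stock len(items), A pops every group and indexes the empty list (IndexError); B returns 0 there. — e.g. on selling_products([1, 2, 2], 4): A raises IndexError, B returns 0
import Mathlib
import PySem

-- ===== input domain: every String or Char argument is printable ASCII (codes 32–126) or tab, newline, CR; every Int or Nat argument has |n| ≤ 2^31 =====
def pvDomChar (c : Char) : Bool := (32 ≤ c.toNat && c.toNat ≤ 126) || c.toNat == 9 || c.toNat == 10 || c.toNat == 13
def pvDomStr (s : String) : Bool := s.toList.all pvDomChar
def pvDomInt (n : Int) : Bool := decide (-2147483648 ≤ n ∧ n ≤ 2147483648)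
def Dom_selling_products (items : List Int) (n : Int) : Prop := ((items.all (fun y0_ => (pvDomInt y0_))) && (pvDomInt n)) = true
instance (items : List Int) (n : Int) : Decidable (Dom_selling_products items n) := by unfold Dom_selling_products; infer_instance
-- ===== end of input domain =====

-- B replaces A's quadratic pop(0) while-loop over the sorted group counts by prefix sums
-- plus one bisect_right (objective: faster, asymptotic O(k^2) -> O(k log k)).

-- ===== PORT A =====
-- the Python while-loop; state: n, list_values (current list), c_value = list_values[0].
-- When the pop empties the list (or the list is already empty) Python's list_values[0]
-- raises IndexError; those inputs are excluded by Pre_, the port returns [] there.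
def loopA : Int → List Int → Int → List Int
  | n, vals, c =>
    if n > 0 then
      if n - c ≥ 0 then
        match vals with
        | _ :: c' :: rest => loopA (n - c) (c' :: rest) c'
        | _ => []                     -- IndexError in Python (outside Pre_)
      else vals
    else vals

def selling_products (items : List Int) (n : Int) : Int :=
  let d := PySem.Dict.counter items
  let list_values := PySem.List.sorted d.values (fun x => x) false
  if n = 0 then (list_values.length : Int)
  else if items = [] ∨ list_values.sum = n then 0
  else if list_values.length = 1 then 1
  else
    let c_value := list_values.headD 0   -- list_values[0]; nonempty here since items ≠ []
    ((loopA n list_values c_value).length : Int)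

-- ===== PORT B =====
-- itertools.accumulate(counts): running prefix sums
def accumB : List Int → Int → List Int
  | [], _ => []
  | v :: t, a => (a + v) :: accumB t (a + v)

def selling_products_alt (items : List Int) (n : Int) : Int :=
  let counts := PySem.List.sorted (PySem.Dict.counter items).values (fun x => x) false
  let pref := accumB counts 0
  let sold := PySem.List.bisectRight pref n
  (counts.length : Int) - (sold : Int)

-- ===== PRECONDITION & SPEC =====
-- Pre_ excludes exactly the inputs where A raises IndexError: at least two distinct
-- values and n greater than the total stock len(items) (A pops every group and then
-- indexes the empty list).
def Pre_selling_products (items : List Int) (n : Int) : Prop :=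
  (∀ x ∈ items, x = items.headD 0) ∨ n ≤ (items.length : Int)

instance (items : List Int) (n : Int) : Decidable (Pre_selling_products items n) := by
  unfold Pre_selling_products; infer_instance

def pvWitness_selling_products : List Int × Int := ([3, 3, 5], 2)

-- When there are at least two distinct values and n exceeds len(items), A pops every
-- group and indexes the empty list (IndexError); B returns 0 there.
def Raises_selling_products (items : List Int) (n : Int) : Prop :=
  ¬ (∀ x ∈ items, x = items.headD 0) ∧ (items.length : Int) < n

instance (items : List Int) (n : Int) : Decidable (Raises_selling_products items n) := by
  unfold Raises_selling_products; infer_instance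

def pvRaiseWitness_selling_products : List Int × Int := ([1, 2, 2], 4)
def pvRaiseWitnessOut_selling_products : Int := 0

-- On inventories with exactly one distinct value and budget n greater than the total
-- stock, A's single-group shortcut returns 1 while B returns 0; everything can be
-- bought, so 0 is the intended number of remaining groups.
def D_selling_products (items : List Int) (n : Int) : Prop :=
  items ≠ [] ∧ (∀ x ∈ items, x = items.headD 0) ∧ (items.length : Int) < n

instance (items : List Int) (n : Int) : Decidable (D_selling_products items n) := by
  unfold D_selling_products; infer_instance

def Spec_selling_products (items : List Int) (n : Int) (out : Int) : Prop :=
  ¬ D_selling_products items n → out = selling_products_alt items n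

instance (items : List Int) (n : Int) (out : Int) : Decidable (Spec_selling_products items n out) := by
  unfold Spec_selling_products; infer_instance

def pvDiffWitness_selling_products : List Int × Int := ([5, 5], 3)
def pvDiffWitnessOut_selling_products : Int × Int := (1, 0)

-- ===== CLAIM =====
def Claim_unchanged_selling_products : Prop :=
  ∀ (items : List Int) (n : Int), Dom_selling_products items n →
    Pre_selling_products items n →
    Spec_selling_products items n (selling_products items n)

def Claim_changed_selling_products : Prop :=
  Dom_selling_products (pvDiffWitness_selling_products.1) (pvDiffWitness_selling_products.2) ∧
  Pre_selling_products (pvDiffWitness_selling_products.1) (pvDiffWitness_selling_products.2) ∧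
  D_selling_products (pvDiffWitness_selling_products.1) (pvDiffWitness_selling_products.2) ∧
  selling_products (pvDiffWitness_selling_products.1) (pvDiffWitness_selling_products.2) = pvDiffWitnessOut_selling_products.1 ∧
  selling_products_alt (pvDiffWitness_selling_products.1) (pvDiffWitness_selling_products.2) = pvDiffWitnessOut_selling_products.2 ∧
  pvDiffWitnessOut_selling_products.1 ≠ pvDiffWitnessOut_selling_products.2

def Claim_exact_selling_products : Prop :=
  ∀ (items : List Int) (n : Int), Dom_selling_products items n →
    Pre_selling_products items n → D_selling_products items n →
    selling_products items n ≠ selling_products_alt items n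

def Claim_raises_selling_products : Prop :=
  (∀ (items : List Int) (n : Int), Dom_selling_products items n →
      Raises_selling_products items n → ¬ Pre_selling_products items n) ∧
  (Dom_selling_products (pvRaiseWitness_selling_products.1) (pvRaiseWitness_selling_products.2) ∧
   Raises_selling_products (pvRaiseWitness_selling_products.1) (pvRaiseWitness_selling_products.2) ∧
   selling_products_alt (pvRaiseWitness_selling_products.1) (pvRaiseWitness_selling_products.2) = pvRaiseWitnessOut_selling_products)

-- ===== LEMMAS AND PROOFS =====

-- accumB basics
theorem accumB_length (t : List Int) : ∀ a, (accumB t a).length = t.length := by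
  induction t with
  | nil => intro a; rfl
  | cons v t ih => intro a; simp [accumB, ih]

theorem accumB_shift (t : List Int) : ∀ a b, accumB t (a + b) = (accumB t b).map (a + ·) := by
  induction t with
  | nil => intro a b; rfl
  | cons v t ih =>
      intro a b
      simp only [accumB, List.map_cons]
      rw [show a + b + v = a + (b + v) by ring, ih a (b + v)]

theorem accumB_mem_le (t : List Int) (h : ∀ v ∈ t, (0:Int) ≤ v) :
    ∀ a x, x ∈ accumB t a → x ≤ a + t.sum := by
  induction t with
  | nil => intro a x hx; simp [accumB] at hx
  | cons v t ih =>
      intro a x hx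
      simp only [accumB, List.mem_cons] at hx
      have hv : (0:Int) ≤ v := h v (by simp)
      have hs : (0:Int) ≤ t.sum := List.sum_nonneg (fun y hy => h y (by simp [hy]))
      rcases hx with rfl | hx
      · simp; omega
      · have := ih (fun y hy => h y (by simp [hy])) (a + v) x hx
        simp at this ⊢; omega

theorem accumB_mem_ge (t : List Int) (h : ∀ v ∈ t, (0:Int) ≤ v) :
    ∀ a x, x ∈ accumB t a → a ≤ x := by
  induction t with
  | nil => intro a x hx; simp [accumB] at hx
  | cons v t ih =>
      intro a x hx
      simp only [accumB, List.mem_cons] at hx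
      have hv : (0:Int) ≤ v := h v (by simp)
      rcases hx with rfl | hx
      · omega
      · have := ih (fun y hy => h y (by simp [hy])) (a + v) x hx
        omega

theorem accumB_pairwise (t : List Int) (h : ∀ v ∈ t, (0:Int) ≤ v) :
    ∀ a, (accumB t a).Pairwise (· ≤ ·) := by
  induction t with
  | nil => intro a; simp [accumB]
  | cons v t ih =>
      intro a
      simp only [accumB, List.pairwise_cons]
      refine ⟨fun x hx => accumB_mem_ge t (fun y hy => h y (by simp [hy])) (a + v) x hx, ?_⟩
      exact ih (fun y hy => h y (by simp [hy])) (a + v)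

-- characterisation of takeWhile length by the first failing index
theorem takeWhile_len_char {α : Type} (p : α → Bool) (xs : List α) :
    ∀ m, m ≤ xs.length →
    (∀ (j : ℕ) (hj : j < xs.length), j < m → p xs[j] = true) →
    (∀ (j : ℕ) (hj : j < xs.length), m ≤ j → ¬ p xs[j] = true) →
    (xs.takeWhile p).length = m := by
  induction xs with
  | nil =>
      intro m hm _ _
      simp only [List.length_nil, Nat.le_zero] at hm
      simp [hm]
  | cons a t ih =>
      intro m hm h1 h2
      by_cases hpa : p a = true
      · have hm0 : m ≠ 0 := by
          intro h0
          exact h2 0 (by simp) (by omega) hpa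
        obtain ⟨m', rfl⟩ : ∃ m', m = m' + 1 := ⟨m - 1, by omega⟩
        rw [List.takeWhile_cons_of_pos hpa]
        simp only [List.length_cons] at hm ⊢
        have := ih m' (by omega)
          (fun j hj hjm => h1 (j+1) (by simpa using Nat.succ_lt_succ hj) (by omega))
          (fun j hj hjm => h2 (j+1) (by simpa using Nat.succ_lt_succ hj) (by omega))
        omega
      · have hm0 : m = 0 := by
          by_contra h0
          exact hpa (h1 0 (by simp) (by omega))
        rw [List.takeWhile_cons_of_neg hpa, hm0]
        rfl

theorem bisect_eq_takeWhile (xs : List Int) (x : Int) (hs : xs.Pairwise (· ≤ ·)) :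
    PySem.List.bisectRight xs x = (xs.takeWhile (fun v => decide (v ≤ x))).length := by
  obtain ⟨hle, h1, h2⟩ := PySem.List.bisectRight_spec xs x hs
  exact (takeWhile_len_char _ xs _ hle
    (fun j hj hjm => by simpa using h1 j hj hjm)
    (fun j hj hjm => by have := h2 j hj hjm; simp; omega)).symm

-- if the budget is below the smallest count, nothing is removable
theorem tw_accum_nil (v : Int) (t : List Int) (n : Int) (h : n < v) :
    ((accumB (v :: t) 0).takeWhile (fun x => decide (x ≤ n))) = [] := by
  rw [show accumB (v :: t) 0 = (0 + v) :: accumB t (0 + v) from rfl,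
    List.takeWhile_cons_of_neg (by simp; omega)]

-- the while loop pops exactly the longest prefix whose running sum stays ≤ n
theorem loopA_len (t : List Int) : ∀ (v n : Int),
    (∀ x ∈ v :: t, (1:Int) ≤ x) → n < (v :: t).sum →
    ((loopA n (v :: t) v).length : Int)
      = ((v :: t).length : Int)
        - (((accumB (v :: t) 0).takeWhile (fun x => decide (x ≤ n))).length : Int) := by
  induction t with
  | nil =>
      intro v n hpos hlt
      simp only [List.sum_cons, List.sum_nil, add_zero] at hlt
      rw [loopA]
      · rw [tw_accum_nil v [] n hlt]
        have hnv : ¬ (n - v ≥ 0) := by omega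
        by_cases hn : n > 0
        · rw [if_pos hn, if_neg hnv]; rfl
        · rw [if_neg hn]; rfl
      · intro a b c hc
        simp at hc
  | cons u t ih =>
      intro v n hpos hlt
      have hv1 : (1:Int) ≤ v := hpos v (by simp)
      rw [loopA]
      by_cases hn : n > 0
      · by_cases hnv : n - v ≥ 0
        · rw [if_pos hn, if_pos hnv]
          have hIH := ih u (n - v) (fun x hx => hpos x (by simp at hx ⊢; tauto))
            (by simp at hlt ⊢; omega)
          have h0 : accumB (u :: t) v = (accumB (u :: t) 0).map (v + ·) := by
            have := accumB_shift (u :: t) v 0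
            rwa [add_zero] at this
          have hacc : accumB (v :: u :: t) 0 = v :: (accumB (u :: t) 0).map (v + ·) := by
        
            show (0 + v) :: accumB (u :: t) (0 + v) = _
            rw [zero_add, h0]
          rw [hacc, List.takeWhile_cons_of_pos (by simp; omega), List.takeWhile_map]
          have hp : ((fun x => decide (x ≤ n)) ∘ (v + ·)) = (fun x => decide (x ≤ n - v)) := by
            funext x
            simp only [Function.comp_apply]
            exact decide_eq_decide.mpr (by omega)
          rw [hp, hIH]
          simp only [List.length_cons, List.length_map]
          push_cast
          ring
        · rw [if_pos hn, if_neg hnv, tw_accum_nil v (u :: t) n (by omega)]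
          rfl
      · rw [if_neg hn]
        have hn0 : n ≤ 0 := by omega
        rw [tw_accum_nil v (u :: t) n (by omega)]
        rfl

-- a nodup list whose members are all equal has at most one element
theorem nodup_all_eq {l : List Int} {h : Int} (hnd : l.Nodup) (hall : ∀ x ∈ l, x = h) :
    l.length ≤ 1 := by
  match l with
  | [] => simp
  | [a] => simp
  | a :: b :: t =>
      exfalso
      have ha := hall a (by simp)
      have hb := hall b (by simp)
      simp [ha, hb] at hnd

theorem ofList_ne_nil (items : List Int) (h : items ≠ []) :
    (PySem.Set.ofList items : List Int) ≠ [] := by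
  intro h0
  cases items with
  | nil => exact h rfl
  | cons a t =>
      have : a ∈ PySem.Set.ofList (a :: t) := (PySem.Set.mem_ofList _ _).mpr (by simp)
      rw [h0] at this
      simp at this

-- the sorted group-count list, as a permutation of counts over the distinct values
theorem vals_perm (items : List Int) :
    (PySem.List.sorted (PySem.Dict.counter items).values (fun x => x) false).Perm
      ((PySem.Set.ofList items).map (fun k => (items.count k : Int))) := by
  have hv : (PySem.Dict.counter items).values
      = (PySem.Set.ofList items).map (fun k => (items.count k : Int)) := by
    simp [PySem.Dict.values, PySem.Dict.items_counter, List.map_map, Function.comp]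
  rw [← hv]
  exact PySem.List.sorted_perm _ _ _

theorem vals_length (items : List Int) :
    (PySem.List.sorted (PySem.Dict.counter items).values (fun x => x) false).length
      = (PySem.Set.ofList items).length := by
  have := (vals_perm items).length_eq
  simpa using this

theorem vals_pos (items : List Int) :
    ∀ v ∈ PySem.List.sorted (PySem.Dict.counter items).values (fun x => x) false, (1:Int) ≤ v := by
  intro v hv
  have := (vals_perm items).mem_iff.mp hv
  simp only [List.mem_map] at this
  obtain ⟨k, hk, rfl⟩ := this
  have hmem : k ∈ items := (PySem.Set.mem_ofList items k).mp hk
  have := List.count_pos_iff.mpr hmem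
  omega

theorem vals_sum (items : List Int) :
    (PySem.List.sorted (PySem.Dict.counter items).values (fun x => x) false).sum
      = (items.length : Int) := by
  rw [(vals_perm items).sum_eq]
  have hperm : (PySem.Set.ofList items : List Int).Perm items.dedup := by
    rw [List.perm_ext_iff_of_nodup (PySem.Set.nodup_ofList items) (List.nodup_dedup items)]
    intro a
    rw [PySem.Set.mem_ofList, List.mem_dedup]
  rw [(hperm.map (fun k => (items.count k : Int))).sum_eq]
  have hcast : (items.dedup.map (fun k => (items.count k : Int))).sum
      = (((items.dedup.map (fun k => items.count k)).sum : ℕ) : ℤ) := by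
    rw [Nat.cast_list_sum, List.map_map]; rfl
  rw [hcast, List.sum_map_count_dedup_eq_length items]

-- distinct ≤ 1 when all items are equal; = 1 when in addition nonempty
theorem ofList_len_one (items : List Int) (hne : items ≠ [])
    (hall : ∀ x ∈ items, x = items.headD 0) :
    (PySem.Set.ofList items : List Int).length = 1 := by
  have h1 : (PySem.Set.ofList items : List Int).length ≤ 1 :=
    nodup_all_eq (PySem.Set.nodup_ofList items)
      (fun x hx => hall x ((PySem.Set.mem_ofList _ _).mp hx))
  have h2 := ofList_ne_nil items hne
  have := List.length_pos_of_ne_nil h2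
  omega

-- ===== VERDICT =====
theorem selling_products_spec : Claim_unchanged_selling_products := by
  intro items n _ hpre
  unfold Spec_selling_products
  intro hD
  unfold D_selling_products at hD
  unfold Pre_selling_products at hpre
  simp only [selling_products, selling_products_alt]
  have hperm := vals_perm items
  have hpos := vals_pos items
  have hsum := vals_sum items
  have hlen := vals_length items
  set vals := PySem.List.sorted (PySem.Dict.counter items).values (fun x => x) false with hvals
  have hpair : (accumB vals 0).Pairwise (· ≤ ·) :=
    accumB_pairwise vals (fun v hv => le_trans (by norm_num) (hpos v hv)) 0
  rw [bisect_eq_takeWhile _ _ hpair]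
  set m := ((accumB vals 0).takeWhile (fun x => decide (x ≤ n))).length with hm
  by_cases hn0 : n = 0
  · -- budget 0: nothing removable
    subst hn0
    have hm0 : m = 0 := by
      rw [hm]
      match hv : vals with
      | [] => rfl
      | v :: t =>
          rw [tw_accum_nil v t 0 (by have := hpos v (by simp); omega)]
          rfl
    simp [hm0]
  · rw [if_neg hn0]
    by_cases hnil : items = []
    · -- empty inventory
      have hvnil : vals = [] := by
        have h2 : (PySem.Set.ofList items : List Int) = [] := by subst hnil; rfl
        rw [h2] at hperm
        simpa using hperm
      rw [if_pos (Or.inl hnil)]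
      simp [hvnil, hm, accumB]
    · by_cases hsn : vals.sum = n
      · -- budget equals total stock: everything removable
        have hall : ∀ x ∈ accumB vals 0, decide (x ≤ n) = true := by
          intro x hx
          have := accumB_mem_le vals (fun v hv => le_trans (by norm_num) (hpos v hv)) 0 x hx
          simp at this ⊢
          omega
        have hmk : m = vals.length := by
          rw [hm, List.takeWhile_eq_self_iff.mpr hall, accumB_length]
        rw [if_pos (Or.inr hsn), hmk]
        simp
      · rw [if_neg (by simp [hnil, hsn])]
        have hsn' : n ≠ (items.length : Int) := by rw [← hsum]; exact fun h => hsn h.symm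
        have hnlen : n ≤ (items.length : Int) := by
          rcases hpre with hpre | hpre
          · -- all items equal: outside D_ the budget is within the stock
            have : ¬ ((items.length : Int) < n) := fun hlt => hD ⟨hnil, hpre, hlt⟩
            omega
          · exact hpre
        by_cases h1 : vals.length = 1
        · -- single group, budget below its count
          obtain ⟨v, hv⟩ := List.length_eq_one_iff.mp h1
          have hvsum : vals.sum = v := by rw [hv]; simp
          have hnv : n < v := by rw [hvsum] at hsn hsum; omega
          have hm0 : m = 0 := by rw [hm, hv, tw_accum_nil v [] n hnv]; rfl
          rw [if_pos h1, hm0, h1]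
          simp
        · -- at least two groups: the loop removes the longest affordable prefix
          rw [if_neg h1]
          have hne : vals ≠ [] := by
            intro h
            rw [h] at hlen
            exact ofList_ne_nil items hnil (List.length_eq_zero_iff.mp hlen.symm)
          obtain ⟨v, t, hv⟩ := List.exists_cons_of_ne_nil hne
          rw [hm, hv]
          simp only [List.headD_cons]
          exact loopA_len t v n (by rw [← hv]; exact hpos)
            (by rw [← hv, hsum]; omega)

theorem selling_products_tight : Claim_exact_selling_products := by
  intro items n _ _ hD
  unfold D_selling_products at hD
  obtain ⟨hne, hall, hlen'⟩ := hD
  have hpos := vals_pos items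
  have hsum := vals_sum items
  have hlen := vals_length items
  simp only [selling_products, selling_products_alt]
  set vals := PySem.List.sorted (PySem.Dict.counter items).values (fun x => x) false with hvals
  have h1 : vals.length = 1 := by rw [hlen, ofList_len_one items hne hall]
  obtain ⟨v, hv⟩ := List.length_eq_one_iff.mp h1
  have hvsum : v = (items.length : Int) := by
    rw [hv] at hsum
    simpa using hsum
  have hlpos : (0:Int) < (items.length : Int) := by
    have := List.length_pos_of_ne_nil hne
    exact_mod_cast this
  have hpair : (accumB vals 0).Pairwise (· ≤ ·) :=
    accumB_pairwise vals (fun x hx => le_trans (by norm_num) (hpos x hx)) 0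
  rw [bisect_eq_takeWhile _ _ hpair, hv]
  rw [if_neg (by omega), if_neg (by simp [hne, List.sum_cons]; omega), if_pos (by rfl)]
  rw [show accumB [v] 0 = [0 + v] from rfl,
    List.takeWhile_cons_of_pos (by simp; omega)]
  simp

@[simp]
theorem selling_products_raises : Claim_raises_selling_products := by
  unfold Claim_raises_selling_products
  refine ⟨?_, by decide⟩
  intro items n _ hR hpre
  unfold Raises_selling_products at hR
  unfold Pre_selling_products at hpre
  obtain ⟨h1, h2⟩ := hR
  rcases hpre with hpre | hpre
  · exact h1 hpre
  · omega

theorem selling_products_changed : Claim_changed_selling_products := by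
  unfold Claim_changed_selling_products; decide
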